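-- pv_equiv track=rewrite | github.com/Fuiradan/stuff_from_univercity | Теория ИС и процессов/Принятие решений/app.py | maximax
-- ===== SOURCE A (Python) =====
-- def maximax(mas):
--     maximum = mas[0][0]
--     maxI = 0
--     for i in range(len(mas)):
--         for j in range(len(mas[i])):
--             if (mas[i][j] > maximum):
--                 maximum = mas[i][j]
--                 maxI = i
--     return maxI
-- ===== SOURCE B (Python) =====
-- def maximax(mas):
--     m = max(x for row in mas for x in row)
--     for i, row in enumerate(mas):
--         if m in row:
--             return i
-- ===== Notes on version B (the rewrite author's own statement) =====
-- stated objective: alternative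
-- what changed: B is two staged passes: it first computes the single global maximum of the flattened matrix, then returns the index of the first row containing it by membership test, carrying no running (max, index) accumulator at all.
import Mathlib
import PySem

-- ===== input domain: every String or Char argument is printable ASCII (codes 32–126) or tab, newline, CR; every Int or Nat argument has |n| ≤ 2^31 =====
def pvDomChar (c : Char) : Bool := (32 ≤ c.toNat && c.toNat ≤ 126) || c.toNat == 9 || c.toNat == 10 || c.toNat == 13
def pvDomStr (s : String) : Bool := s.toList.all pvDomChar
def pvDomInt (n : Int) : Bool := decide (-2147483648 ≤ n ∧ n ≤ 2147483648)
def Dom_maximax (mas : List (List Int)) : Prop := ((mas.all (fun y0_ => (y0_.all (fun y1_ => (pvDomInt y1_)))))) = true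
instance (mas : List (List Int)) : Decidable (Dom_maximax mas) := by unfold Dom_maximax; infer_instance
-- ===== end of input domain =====

-- B replaces A's running (max, index) accumulator by two staged passes: global max of the flattened matrix, then first row containing it.

-- ===== PORT A =====
-- literal transliteration: nested index loops; mas[0][0] and mas[i]/mas[i][j] via pyGetD
-- (the defaults are never used: Pre_ guarantees mas[0][0] exists, and the loop indices are in range)
def maximax (mas : List (List Int)) : Int :=
  let maximum : Int := PySem.List.pyGetD (PySem.List.pyGetD mas 0 []) 0 0
  let st :=
    (PySem.List.pyRange 0 (PySem.List.len mas) 1).foldl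
      (fun (st : Int × Int) i =>
        let row := PySem.List.pyGetD mas i []
        (PySem.List.pyRange 0 (PySem.List.len row) 1).foldl
          (fun (st : Int × Int) j =>
            let x := PySem.List.pyGetD row j 0
            if x > st.1 then (x, i) else st)
          st)
      (maximum, 0)
  st.2

-- ===== PORT B =====
-- literal transliteration of Source B: m = max over the flattened generator, then the first row containing m.
-- (Python falls off the loop, returning None, only if no row contains m — impossible once max() returned;
--  the 'none => 0' arm transcribes that unreachable fall-through.)
def maximax_alt (mas : List (List Int)) : Int :=
  let m := (PySem.List.max? (mas.flatMap (fun row => row)) (fun y => y)).getD 0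
  match (PySem.List.enumerate mas 0).find? (fun p => p.2.contains m) with
  | some p => p.1
  | none => 0

-- ===== PRECONDITION & SPEC =====
-- Pre_ excludes exactly the inputs on which A raises IndexError at mas[0][0]: empty mas or empty first row.
def Pre_maximax (mas : List (List Int)) : Prop := mas ≠ [] ∧ mas.headD [] ≠ []
instance (mas : List (List Int)) : Decidable (Pre_maximax mas) := by unfold Pre_maximax; infer_instance
def pvWitness_maximax : List (List Int) := [[1, 5], [], [7, 2]]

def Spec_maximax (mas : List (List Int)) (out : Int) : Prop := out = maximax_alt mas
instance (mas : List (List Int)) (out : Int) : Decidable (Spec_maximax mas out) := by unfold Spec_maximax; infer_instance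

-- ===== CLAIM (what is proved, stated in full; the proofs are below) =====
def Claim_equal_maximax : Prop := ∀ (mas : List (List Int)), Dom_maximax mas → Pre_maximax mas → Spec_maximax mas (maximax mas)

-- ===== LEMMAS AND PROOFS =====

-- A's inner element loop computes (running max, i-if-beaten-else-old)
lemma inner_fold_eq (t : List Int) (i m mi : Int) :
    t.foldl (fun (st : Int × Int) x => if x > st.1 then (x, i) else st) (m, mi)
      = (t.foldl max m, if t.foldl max m > m then i else mi) := by
  induction t generalizing m mi with
  | nil => simp
  | cons a t ih =>
    by_cases h : a > m
    · have ha : max m a = a := by omega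
      have hle : a ≤ t.foldl max a := (PySem.List.le_foldl_max t a).1
      simp only [List.foldl_cons, if_pos h, ih, ha]
      have : t.foldl max a > m := by omega
      simp [this]
    · have ha : max m a = m := by omega
      simp [List.foldl_cons, if_neg h, ih, ha]

-- A's whole outer loop, as a fold over enumerated rows, computes the global running max
-- together with the index of the first row containing it (when it beats the seed).
lemma A_fold_eq (rs : List (List Int)) (k m mi : Int) :
    (PySem.List.enumerate rs k).foldl
        (fun (st : Int × Int) p =>
          (p.2.foldl max st.1, if p.2.foldl max st.1 > st.1 then p.1 else st.2))
        (m, mi)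
      = (rs.flatten.foldl max m,
         if rs.flatten.foldl max m > m then
           (((PySem.List.enumerate rs k).find?
               (fun p => decide (rs.flatten.foldl max m ∈ p.2))).map Prod.fst).getD mi
         else mi) := by
  induction rs generalizing k m mi with
  | nil => simp [PySem.List.enumerate]
  | cons row rs ih =>
    rw [PySem.List.enumerate_cons, List.foldl_cons, ih]
    have hflat : (row :: rs).flatten.foldl max m = rs.flatten.foldl max (row.foldl max m) := by
      simp [List.foldl_append]
    simp only [hflat]
    have hm1 : m ≤ row.foldl max m := (PySem.List.le_foldl_max row m).1
    have hm1M : row.foldl max m ≤ rs.flatten.foldl max (row.foldl max m) :=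
      (PySem.List.le_foldl_max rs.flatten (row.foldl max m)).1
    refine Prod.ext_iff.mpr ⟨rfl, ?_⟩
    by_cases h : rs.flatten.foldl max (row.foldl max m) > row.foldl max m
    · -- the final max lies strictly beyond the head row
      have hMm : rs.flatten.foldl max (row.foldl max m) > m := by omega
      have hnot : rs.flatten.foldl max (row.foldl max m) ∉ row := by
        intro hmem
        have := (PySem.List.le_foldl_max row m).2 _ hmem
        omega
      -- the max is attained in rs, so the tail find? succeeds and the default is irrelevant
      have hmem : rs.flatten.foldl max (row.foldl max m) ∈ rs.flatten := by
        rcases PySem.List.foldl_max_mem rs.flatten (row.foldl max m) with h1 | h1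
        · omega
        · exact h1
      have hsome : ((PySem.List.enumerate rs (k + 1)).find?
          (fun p => decide (rs.flatten.foldl max (row.foldl max m) ∈ p.2))).isSome := by
        obtain ⟨r, hr, hMr⟩ := List.mem_flatten.mp hmem
        obtain ⟨j, hj, hrj⟩ := List.mem_iff_getElem.mp hr
        have hpmem : ((k + 1 + (j : Int)), r) ∈ PySem.List.enumerate rs (k + 1) := by
          rw [PySem.List.mem_enumerate_iff]
          exact ⟨j, hj, by rw [hrj]⟩
        rw [List.find?_isSome]
        exact ⟨_, hpmem, by simpa using hMr⟩
      obtain ⟨q, hq⟩ := Option.isSome_iff_exists.mp hsome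
      simp [h, hMm, hnot, hq]
    · -- the head row already attains the final max
      have hMeq : rs.flatten.foldl max (row.foldl max m) = row.foldl max m := by omega
      by_cases h2 : row.foldl max m > m
      · have hin : rs.flatten.foldl max (row.foldl max m) ∈ row := by
          rw [hMeq]
          rcases PySem.List.foldl_max_mem row m with h1 | h1
          · omega
          · exact h1
        rw [hMeq] at hin
        simp [hMeq, h2, hin]
      · have hmm : row.foldl max m = m := by omega
        rw [hmm] at h
        simp [h, hmm]

-- A's port equals the canonical fold over enumerated rows
lemma maximax_as_fold (mas : List (List Int)) :
    maximax mas = ((PySem.List.enumerate mas 0).foldl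
        (fun (st : Int × Int) p =>
          (p.2.foldl max st.1, if p.2.foldl max st.1 > st.1 then p.1 else st.2))
        (PySem.List.pyGetD (PySem.List.pyGetD mas 0 []) 0 0, 0)).2 := by
  simp only [maximax]
  refine congrArg Prod.snd ?_
  rw [PySem.List.enumerate_eq_map_pyRange mas [], List.foldl_map]
  refine List.foldl_ext _ _ _ ?_
  intro st i _
  rw [PySem.List.foldl_pyRange_zero_pyGetD (PySem.List.pyGetD mas i []) 0
        (fun (st : Int × Int) y => if y > st.1 then (y, i) else st) st]
  exact inner_fold_eq _ i st.1 st.2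

-- both programs compute the same index on every input admitted by Pre_
lemma maximax_eq (mas : List (List Int)) (hpre : Pre_maximax mas) :
    maximax mas = maximax_alt mas := by
  obtain ⟨h1, h2⟩ := hpre
  cases mas with
  | nil => exact absurd rfl h1
  | cons r rest =>
  cases r with
  | nil => simp at h2
  | cons x xs =>
  have hseed : PySem.List.pyGetD (PySem.List.pyGetD ((x :: xs) :: rest) 0 []) 0 0 = x := by
    simp [PySem.List.pyGetD, PySem.List.pyGet?, PySem.List.pyIdx?]
  -- the two maxima coincide: A's running max over the flattened matrix is B's max()
  have hmB : (PySem.List.max? (((x :: xs) :: rest).flatMap (fun row => row)) (fun y => y)).getD 0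
      = (xs ++ rest.flatten).foldl max x := by
    have : ((x :: xs) :: rest).flatMap (fun row => row) = x :: (xs ++ rest.flatten) := by simp
    rw [this, PySem.List.max?_id_cons]
    rfl
  have hMA : ((x :: xs) :: rest).flatten.foldl max x = (xs ++ rest.flatten).foldl max x := by
    simp
  rw [maximax_as_fold, hseed, A_fold_eq]
  simp only [maximax_alt, hmB, hMA]
  have hxM : x ≤ (xs ++ rest.flatten).foldl max x :=
    (PySem.List.le_foldl_max (xs ++ rest.flatten) x).1
  have hpred : (fun p : Int × List Int => p.2.contains ((xs ++ rest.flatten).foldl max x))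
      = (fun p : Int × List Int => decide ((xs ++ rest.flatten).foldl max x ∈ p.2)) := by
    funext p; simp
  by_cases h : (xs ++ rest.flatten).foldl max x > x
  · simp only [h, if_pos, hpred]
    cases hf : (PySem.List.enumerate ((x :: xs) :: rest) 0).find?
        (fun p => decide ((xs ++ rest.flatten).foldl max x ∈ p.2)) with
    | none => simp
    | some q => simp
  · -- the seed x is already the global max: A returns 0, B finds it in row 0
    have hMx : (xs ++ rest.flatten).foldl max x = x := by omega
    simp only [hMx]
    simp [PySem.List.enumerate_cons]

-- ===== VERDICT (by name: the statement is the Claim_ definition above) =====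
theorem maximax_spec : Claim_equal_maximax := by
  intro mas _ hpre
  exact maximax_eq mas hpre
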